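-- pv_equiv track=rewrite | github.com/Mash-Isa/Advent | task7/solution2.py | custom_eval
-- ===== SOURCE A (Python) =====
-- def custom_eval(numbers, ops):
--     expr = [(n, op) for n, op in zip(numbers, ops + ("",))]
--     i = 0
--     while i < len(expr) - 1:
--         n, op = expr[i]
--         next_n, next_op = expr[i + 1]
--         if op == "||":
--             # concatenate n and next_n
--             new_n = int(str(n) + str(next_n))
--             # replace in expr
--             expr[i] = (new_n, next_op)
--             del expr[i + 1]
--             i = max(i - 1, 0)  # step back to catch consecutive ||
--         else:
--             i += 1
--     # evaluate left to right
--     result = expr[0][0]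
--     for i in range(len(expr)-1):
--         op = expr[i][1]
--         next_n = expr[i+1][0]
--         if op == "+":
--             result += next_n
--         elif op == "*":
--             result *= next_n
--     return result
-- ===== SOURCE B (Python) =====
-- def custom_eval(numbers, ops):
--     # single forward pass: fuse consecutive || into one group, then evaluate left to right
--     groups = []
--     cur = None
--     for n, op in zip(numbers, list(ops) + [""]):
--         if cur is None:
--             cur = (n, op)
--         elif cur[1] == "||":
--             cur = (int(str(cur[0]) + str(n)), op)
--         else:
--             groups.append(cur)
--             cur = (n, op)
--     if cur is not None:
--         groups.append(cur)
--     result, op = groups[0]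
--     for n, next_op in groups[1:]:
--         if op == "+":
--             result += n
--         elif op == "*":
--             result *= n
--         op = next_op
--     return result
-- ===== Notes on version B (the rewrite author's own statement) =====
-- stated objective: faster
-- what changed: Replaces A's index-mutating while loop with backtracking (set/delete in the middle of the list, i = max(i-1,0)) and a second indexed evaluation loop by one forward pass that fuses consecutive || groups with a running accumulator and a pair-wise left-to-right fold for evaluation.
import Mathlib
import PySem

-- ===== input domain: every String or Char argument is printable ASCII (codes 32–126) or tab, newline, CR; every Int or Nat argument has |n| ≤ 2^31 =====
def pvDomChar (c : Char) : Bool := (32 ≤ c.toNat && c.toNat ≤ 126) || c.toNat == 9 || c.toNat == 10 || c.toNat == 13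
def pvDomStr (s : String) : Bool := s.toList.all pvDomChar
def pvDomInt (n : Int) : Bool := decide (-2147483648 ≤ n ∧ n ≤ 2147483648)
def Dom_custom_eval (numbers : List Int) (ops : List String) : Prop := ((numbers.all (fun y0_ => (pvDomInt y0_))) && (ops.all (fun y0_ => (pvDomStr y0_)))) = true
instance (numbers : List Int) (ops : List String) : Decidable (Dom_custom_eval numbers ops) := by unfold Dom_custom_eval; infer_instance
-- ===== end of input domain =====

-- B fuses consecutive "||" groups in one forward pass and evaluates with a pair fold,
-- instead of A's in-place set/delete loop with backtracking and indexed evaluation.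

-- int(str(n) + str(m)), the concatenation both Pythons compute; 0 stands for the
-- ValueError case (excluded by Pre_custom_eval).
def pvConcat (n m : Int) : Int :=
  (PySem.Int.ofStr? (PySem.Int.toStr n ++ PySem.Int.toStr m)).getD 0

-- ===== PORT A =====
-- the while loop: i advances, or merges at i via set/eraseIdx and steps back to max(i-1,0)
def aLoop (expr : List (Int × String)) (i : Nat) : List (Int × String) :=
  if h : i + 1 < expr.length then
    let n := (expr.getD i (0, "")).1
    let op := (expr.getD i (0, "")).2
    let next_n := (expr.getD (i + 1) (0, "")).1
    let next_op := (expr.getD (i + 1) (0, "")).2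
    if op == "||" then
      aLoop ((expr.set i (pvConcat n next_n, next_op)).eraseIdx (i + 1)) (i - 1)
    else
      aLoop expr (i + 1)
  else expr
termination_by 2 * expr.length - i
decreasing_by
  · simp only [List.length_eraseIdx, List.length_set, h, if_pos]
    omega
  · omega

-- body of A's evaluation loop over range(len(expr)-1)
def aStep (expr : List (Int × String)) (result : Int) (i : Nat) : Int :=
  let op := (expr.getD i (0, "")).2
  let next_n := (expr.getD (i + 1) (0, "")).1
  if op == "+" then result + next_n
  else if op == "*" then result * next_n
  else result

def aEval (expr : List (Int × String)) : Int :=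
  (List.range (expr.length - 1)).foldl (aStep expr) (expr.getD 0 (0, "")).1

def custom_eval (numbers : List Int) (ops : List String) : Int :=
  let expr := List.zip numbers (ops ++ [""])
  aEval (aLoop expr 0)

-- ===== PORT B =====
-- one step of B's grouping pass: state = (groups so far, current group or None)
def bPush (st : List (Int × String) × Option (Int × String)) (p : Int × String) :
    List (Int × String) × Option (Int × String) :=
  match st.2 with
  | none => (st.1, some p)
  | some cur =>
    if cur.2 == "||" then (st.1, some (pvConcat cur.1 p.1, p.2))
    else (st.1 ++ [cur], some p)

-- the trailing 'if cur is not None: groups.append(cur)'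
def bFinish (st : List (Int × String) × Option (Int × String)) : List (Int × String) :=
  match st.2 with
  | none => st.1
  | some cur => st.1 ++ [cur]

-- body of B's evaluation loop: state = (result, pending op)
def bEvalStep (s : Int × String) (p : Int × String) : Int × String :=
  (if s.2 == "+" then s.1 + p.1
   else if s.2 == "*" then s.1 * p.1
   else s.1, p.2)

def custom_eval_alt (numbers : List Int) (ops : List String) : Int :=
  let pairs := List.zip numbers (ops ++ [""])
  let groups := bFinish (pairs.foldl bPush ([], none))
  ((groups.drop 1).foldl bEvalStep (groups.getD 0 (0, ""))).1

-- ===== PRECONDITION & SPEC =====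
-- Pre_ excludes exactly the inputs where the Python raises: numbers = [] (IndexError at
-- expr[0][0]) and a "||" whose right operand is negative (int("…-…") is a ValueError);
-- B raises identically there.
def Pre_custom_eval (numbers : List Int) (ops : List String) : Prop :=
  numbers ≠ [] ∧
  ∀ i < min numbers.length (ops.length + 1) - 1,
    ops.getD i "" = "||" → 0 ≤ numbers.getD (i + 1) 0
instance (numbers : List Int) (ops : List String) : Decidable (Pre_custom_eval numbers ops) := by
  unfold Pre_custom_eval; infer_instance

def pvWitness_custom_eval : List Int × List String := ([1, 2, 3], ["||", "+"])

def Spec_custom_eval (numbers : List Int) (ops : List String) (out : Int) : Prop := out = custom_eval_alt numbers ops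
instance (numbers : List Int) (ops : List String) (out : Int) : Decidable (Spec_custom_eval numbers ops out) := by unfold Spec_custom_eval; infer_instance

-- ===== CLAIM (what is proved, stated in full; the proofs are below) =====
def Claim_equal_custom_eval : Prop := ∀ (numbers : List Int) (ops : List String), Dom_custom_eval numbers ops → Pre_custom_eval numbers ops → Spec_custom_eval numbers ops (custom_eval numbers ops)

-- ===== LEMMAS AND PROOFS =====

-- the common functional specification of the grouping phase: fuse "||" runs starting at cur
def pvMergeFrom (cur : Int × String) : List (Int × String) → List (Int × String)
  | [] => [cur]
  | p :: rest =>
    if cur.2 == "||" then pvMergeFrom (pvConcat cur.1 p.1, p.2) rest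
    else cur :: pvMergeFrom p rest

def pvMerge : List (Int × String) → List (Int × String)
  | [] => []
  | x :: rest => pvMergeFrom x rest

lemma pvMerge_cons_cons (n : Int) (op : String) (m : Int) (op2 : String)
    (r : List (Int × String)) :
    pvMerge ((n, op) :: (m, op2) :: r)
      = if op == "||" then pvMerge ((pvConcat n m, op2) :: r)
        else (n, op) :: pvMerge ((m, op2) :: r) := by
  simp only [pvMerge, pvMergeFrom]

lemma aLoop_eq_merge (N : Nat) (rest pre : List (Int × String))
    (hN : 2 * rest.length + pre.length ≤ N)
    (hpre : ∀ p ∈ pre, p.2 ≠ "||") :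
    aLoop (pre ++ rest) pre.length = pre ++ pvMerge rest := by
  induction N generalizing rest pre with
  | zero =>
    match rest with
    | [] => rw [aLoop]; simp [pvMerge]
    | _ :: _ => simp at hN
  | succ N ih =>
    match rest with
    | [] => rw [aLoop]; simp [pvMerge]
    | [x] => rw [aLoop]; simp [pvMerge, pvMergeFrom]
    | (n, op) :: (m, op2) :: r =>
      rw [aLoop]
      have hlen : pre.length + 1 < (pre ++ (n, op) :: (m, op2) :: r).length := by
        simp only [List.length_append, List.length_cons]; omega
      have g0 : (pre ++ (n, op) :: (m, op2) :: r).getD pre.length (0, "") = (n, op) := by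
        simp [List.getD_eq_getElem?_getD]
      have g1 : (pre ++ (n, op) :: (m, op2) :: r).getD (pre.length + 1) (0, "") = (m, op2) := by
        simp [List.getD_eq_getElem?_getD]
      simp only [hlen, dif_pos, g0, g1]
      by_cases hop : op = "||"
      · simp only [hop, beq_self_eq_true, if_true]
        have hset : (pre ++ (n, "||") :: (m, op2) :: r).set pre.length (pvConcat n m, op2)
            = pre ++ (pvConcat n m, op2) :: (m, op2) :: r := by
          rw [List.set_append_right _ _ (Nat.le_refl pre.length)]
          simp
        have herase : (pre ++ (pvConcat n m, op2) :: (m, op2) :: r).eraseIdx (pre.length + 1)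
            = pre ++ (pvConcat n m, op2) :: r := by
          rw [List.eraseIdx_append_of_length_le (by simp)]
          simp
        rw [hset, herase]
        rcases List.eq_nil_or_concat pre with rfl | ⟨pre₀, p, rfl⟩
        all_goals simp only [List.concat_eq_append] at hpre hN hset herase ⊢
        · have := ih ((pvConcat n m, op2) :: r) [] (by simp at hN ⊢; omega) (by simp)
          simp only [List.nil_append, List.length_nil] at this ⊢
          rw [show (0 : Nat) - 1 = 0 from rfl, this, pvMerge_cons_cons]
          simp
        · have hp : p.2 ≠ "||" := hpre p (by simp)
          have h0 : ∀ q ∈ pre₀, q.2 ≠ "||" := fun q hq => hpre q (by simp [hq])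
          have hlen' : (pre₀ ++ [p]).length - 1 = pre₀.length := by simp
          rw [hlen']
          have hih := ih (p :: (pvConcat n m, op2) :: r) pre₀ (by simp at hN ⊢; omega) h0
          rw [show pre₀ ++ p :: (pvConcat n m, op2) :: r
              = (pre₀ ++ [p]) ++ (pvConcat n m, op2) :: r by simp] at hih
          rw [hih]
          obtain ⟨pn, pop⟩ := p
          rw [pvMerge_cons_cons, if_neg (by simpa using hp), pvMerge_cons_cons, if_pos (by simp [hop])]
          simp
      · have hop' : (op == "||") = false := by simp [hop]
        simp only [hop', if_false]
        have hlen2 : pre.length + 1 = (pre ++ [(n, op)]).length := by simp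
        rw [hlen2]
        have hih := ih ((m, op2) :: r) (pre ++ [(n, op)])
          (by simp at hN ⊢; omega)
          (by intro q hq; rcases List.mem_append.mp hq with h | h
              · exact hpre q h
              · simp at h; subst h; simpa using hop)
        rw [show (pre ++ [(n, op)]) ++ (m, op2) :: r = pre ++ (n, op) :: (m, op2) :: r by
          simp] at hih
        rw [hih, pvMerge_cons_cons, if_neg (by simp [hop])]
        simp [hop]

lemma bGroup_eq_merge (rest : List (Int × String)) (groups : List (Int × String))
    (cur : Int × String) :
    bFinish (rest.foldl bPush (groups, some cur)) = groups ++ pvMerge (cur :: rest) := by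
  induction rest generalizing groups cur with
  | nil => simp [bFinish, pvMerge, pvMergeFrom]
  | cons p rest ih =>
    by_cases hop : cur.2 = "||"
    · simp only [List.foldl_cons, bPush, hop, beq_self_eq_true, if_true]
      rw [ih]
      simp [pvMerge, pvMergeFrom, hop]
    · have hop' : (cur.2 == "||") = false := by simp [hop]
      simp only [List.foldl_cons, bPush, hop', Bool.false_eq_true, if_false]
      rw [ih]
      simp only [pvMerge, pvMergeFrom, hop', Bool.false_eq_true, if_false, List.append_assoc,
        List.singleton_append]

lemma eval_idx_eq_fold (t : List (Int × String)) (x : Int × String) (acc : Int) :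
    (List.range t.length).foldl (aStep (x :: t)) acc = (t.foldl bEvalStep (acc, x.2)).1 := by
  induction t generalizing x acc with
  | nil => simp
  | cons y t ih =>
    rw [List.length_cons, List.range_succ_eq_map, List.foldl_cons, List.foldl_map]
    have hshift : ∀ (r : Int) (i : Nat),
        aStep (x :: y :: t) r (i + 1) = aStep (y :: t) r i := by
      intro r i; simp [aStep]
    have hstep : aStep (x :: y :: t) acc 0 = (bEvalStep (acc, x.2) y).1 := by
      simp [aStep, bEvalStep]
    calc (List.range t.length).foldl (fun r i => aStep (x :: y :: t) r (i + 1))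
            (aStep (x :: y :: t) acc 0)
        = (List.range t.length).foldl (aStep (y :: t)) (aStep (x :: y :: t) acc 0) := by
          apply PySem.List.foldl_congr_mem
          intro r i _
          exact hshift r i
      _ = (t.foldl bEvalStep (aStep (x :: y :: t) acc 0, y.2)).1 := ih _ _
      _ = ((y :: t).foldl bEvalStep (acc, x.2)).1 := by
          rw [List.foldl_cons,
            show bEvalStep (acc, x.2) y = (aStep (x :: y :: t) acc 0, y.2) by
              simp [aStep, bEvalStep]]

lemma aEval_eq_bEval (g : List (Int × String)) :
    aEval g = ((g.drop 1).foldl bEvalStep (g.getD 0 (0, ""))).1 := by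
  match g with
  | [] => simp [aEval]
  | x :: t =>
    simp only [aEval, List.length_cons, Nat.add_sub_cancel, List.drop_one, List.tail_cons,
      List.getD_cons_zero]
    have := eval_idx_eq_fold t x (x.1)
    rw [← this]

-- ===== VERDICT (by name: the statement is the Claim_ definition above) =====
theorem custom_eval_spec : Claim_equal_custom_eval := by
  intro numbers ops _hdom _hpre
  unfold Spec_custom_eval
  dsimp only [custom_eval, custom_eval_alt]
  have hloop := aLoop_eq_merge (2 * (List.zip numbers (ops ++ [""])).length)
    (List.zip numbers (ops ++ [""])) [] (by simp) (by simp)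
  simp only [List.nil_append, List.length_nil] at hloop
  rw [hloop]
  have hgroup : bFinish ((List.zip numbers (ops ++ [""])).foldl bPush ([], none))
      = pvMerge (List.zip numbers (ops ++ [""])) := by
    match h : List.zip numbers (ops ++ [""]) with
    | [] => simp [bFinish, pvMerge]
    | p :: rest =>
      rw [List.foldl_cons]
      show bFinish (rest.foldl bPush (([] : List (Int × String)), some p)) = _
      rw [bGroup_eq_merge]
      simp
  rw [hgroup]
  exact aEval_eq_bEval _
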